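-- pv_equiv track=rewrite | github.com/fraiseql/fraiseql | .phases/verify-examples-compliance/sql-parser.py | _split_select_columns
-- ===== SOURCE A (Python) =====
-- from typing import Any, Dict, List, Optional, Set, Tuple
--
-- def _split_select_columns(select_part: str) -> List[str]:
--     """Split SELECT columns, handling nested functions."""
--     columns = []
--     current = ""
--     paren_depth = 0
--
--     for char in select_part:
--         if char == "(":
--             paren_depth += 1
--         elif char == ")":
--             paren_depth -= 1
--         elif char == "," and paren_depth == 0:
--             columns.append(current)
--             current = ""
--             continue
--         current += char
--
--     if current:
--         columns.append(current)
--
--     return columns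
-- ===== SOURCE B (Python) =====
-- from typing import List
--
--
-- def _next_top_comma(s: str) -> int:
--     """Index of the first comma at parenthesis depth 0, or -1."""
--     depth = 0
--     for i, ch in enumerate(s):
--         if ch == "(":
--             depth += 1
--         elif ch == ")":
--             depth -= 1
--         elif ch == "," and depth == 0:
--             return i
--     return -1
--
--
-- def _split_select_columns(select_part: str) -> List[str]:
--     """Split SELECT columns by slicing at top-level comma positions."""
--     parts = []
--     rest = select_part
--     while True:
--         i = _next_top_comma(rest)
--         if i == -1:
--             parts.append(rest)
--             break
--         parts.append(rest[:i])
--         rest = rest[i + 1:]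
--     if parts[-1] == "":
--         parts.pop()
--     return parts
-- ===== Notes on version B (the rewrite author's own statement) =====
-- stated objective: alternative
-- what changed: Replaced A's single fold that accumulates each column character-by-character with a find-next-top-level-comma helper plus slicing between comma positions, dropping the last slice only when it is empty.
import Mathlib
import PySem

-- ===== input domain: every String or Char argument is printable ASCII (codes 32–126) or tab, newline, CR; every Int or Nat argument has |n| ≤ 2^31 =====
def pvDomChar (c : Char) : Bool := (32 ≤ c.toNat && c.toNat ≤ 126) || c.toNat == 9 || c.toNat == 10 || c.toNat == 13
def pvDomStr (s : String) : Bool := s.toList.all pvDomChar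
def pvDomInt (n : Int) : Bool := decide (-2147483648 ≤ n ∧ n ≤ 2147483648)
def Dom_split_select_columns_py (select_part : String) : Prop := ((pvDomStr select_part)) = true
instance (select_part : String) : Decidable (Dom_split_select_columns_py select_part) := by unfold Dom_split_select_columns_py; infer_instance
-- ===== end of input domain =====

-- B replaces A's character-accumulator fold by find-next-top-level-comma + slicing
-- (alternative decomposition, same cost); return values proved equal on all inputs.

-- ===== PORT A =====
-- one fold step of A's for-loop; state = (columns, current, paren_depth), strings as List Char
def pvAStep (st : List (List Char) × List Char × Int) (c : Char) :
    List (List Char) × List Char × Int :=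
  if c = '(' then (st.1, st.2.1 ++ [c], st.2.2 + 1)
  else if c = ')' then (st.1, st.2.1 ++ [c], st.2.2 - 1)
  else if c = ',' ∧ st.2.2 = 0 then (st.1 ++ [st.2.1], [], st.2.2)
  else (st.1, st.2.1 ++ [c], st.2.2)

-- final 'if current: columns.append(current)'
def pvFinishA (st : List (List Char) × List Char × Int) : List (List Char) :=
  if st.2.1 = [] then st.1 else st.1 ++ [st.2.1]

def split_select_columns_py (select_part : String) : List String :=
  (pvFinishA (select_part.toList.foldl pvAStep ([], [], 0))).map String.mk

-- ===== PORT B =====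
-- _next_top_comma: index of first comma at depth 0 (none = Python's -1)
def pvNextTopComma : List Char → Int → Option Nat
  | [], _ => none
  | c :: rest, d =>
    if c = '(' then (pvNextTopComma rest (d + 1)).map (· + 1)
    else if c = ')' then (pvNextTopComma rest (d - 1)).map (· + 1)
    else if c = ',' ∧ d = 0 then some 0
    else (pvNextTopComma rest d).map (· + 1)

-- the while-loop of B: cut at each top-level comma (rest[:i], rest = rest[i+1:])
def pvSplitRec (cs : List Char) : List (List Char) :=
  match h : pvNextTopComma cs 0 with
  | none => [cs]
  | some i => cs.take i :: pvSplitRec (cs.drop (i + 1))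
termination_by cs.length
decreasing_by
  have hne : cs ≠ [] := by intro e; subst e; simp [pvNextTopComma] at h
  have : 0 < cs.length := List.length_pos_iff.mpr hne
  simp [List.length_drop]; omega

-- 'if parts[-1] == "": parts.pop()'
def pvTrimLast (ps : List (List Char)) : List (List Char) :=
  if ps.getLast? = some [] then ps.dropLast else ps

def split_select_columns_py_alt (select_part : String) : List String :=
  (pvTrimLast (pvSplitRec select_part.toList)).map String.mk

-- ===== PRECONDITION & SPEC =====
def Spec_split_select_columns_py (select_part : String) (out : List String) : Prop := out = split_select_columns_py_alt select_part
instance (select_part : String) (out : List String) : Decidable (Spec_split_select_columns_py select_part out) := by unfold Spec_split_select_columns_py; infer_instance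

-- ===== CLAIM (what is proved, stated in full; the proofs are below) =====
def Claim_equal_split_select_columns_py : Prop := ∀ (select_part : String), Dom_split_select_columns_py select_part → Spec_split_select_columns_py select_part (split_select_columns_py select_part)

-- ===== LEMMAS AND PROOFS =====

-- proof-side variant of pvSplitRec carrying the prefix A has accumulated in `current`
def pvSplitFrom (cur cs : List Char) : List (List Char) :=
  match h : pvNextTopComma cs 0 with
  | none => [cur ++ cs]
  | some i => (cur ++ cs.take i) :: pvSplitFrom [] (cs.drop (i + 1))
termination_by cs.length
decreasing_by
  have hne : cs ≠ [] := by intro e; subst e; simp [pvNextTopComma] at h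
  have : 0 < cs.length := List.length_pos_iff.mpr hne
  simp [List.length_drop]; omega

lemma pvSplitRec_none (cs : List Char) (h : pvNextTopComma cs 0 = none) :
    pvSplitRec cs = [cs] := by
  rw [pvSplitRec]; split <;> simp_all

lemma pvSplitRec_some (cs : List Char) (i : Nat) (h : pvNextTopComma cs 0 = some i) :
    pvSplitRec cs = cs.take i :: pvSplitRec (cs.drop (i + 1)) := by
  rw [pvSplitRec]; split <;> simp_all

lemma pvSplitFrom_none (cur cs : List Char) (h : pvNextTopComma cs 0 = none) :
    pvSplitFrom cur cs = [cur ++ cs] := by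
  rw [pvSplitFrom]; split <;> simp_all

lemma pvSplitFrom_some (cur cs : List Char) (i : Nat) (h : pvNextTopComma cs 0 = some i) :
    pvSplitFrom cur cs = (cur ++ cs.take i) :: pvSplitFrom [] (cs.drop (i + 1)) := by
  rw [pvSplitFrom]; split <;> simp_all

lemma pvSplitFrom_nil_eq (cs : List Char) : pvSplitFrom [] cs = pvSplitRec cs := by
  induction cs using pvSplitRec.induct with
  | case1 cs h => rw [pvSplitFrom_none _ _ h, pvSplitRec_none _ h]; simp
  | case2 cs i h ih => rw [pvSplitFrom_some _ _ _ h, pvSplitRec_some _ _ h, ih]; simp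

lemma pvSplitFrom_ne_nil (cur cs : List Char) : pvSplitFrom cur cs ≠ [] := by
  rw [pvSplitFrom]; split <;> simp

lemma pvTrimLast_cons (x : List Char) (ps : List (List Char)) (h : ps ≠ []) :
    pvTrimLast (x :: ps) = x :: pvTrimLast ps := by
  obtain ⟨p, ps', rfl⟩ := List.exists_cons_of_ne_nil h
  unfold pvTrimLast
  rw [List.getLast?_cons_cons]
  split <;> simp

-- A's fold from depth 0 with no top-level comma ahead just appends cs to current
lemma pvFold_none : ∀ (cs : List Char) (d : Int), pvNextTopComma cs d = none →
    ∀ (cols : List (List Char)) (cur : List Char),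
    ∃ d', cs.foldl pvAStep (cols, cur, d) = (cols, cur ++ cs, d') := by
  intro cs
  induction cs with
  | nil => intro d _ cols cur; exact ⟨d, by simp⟩
  | cons c rest ih =>
    intro d h cols cur
    rw [pvNextTopComma] at h
    split at h
    · rename_i h1
      subst h1
      rw [Option.map_eq_none_iff] at h
      obtain ⟨d', hd⟩ := ih _ h cols (cur ++ ['('])
      exact ⟨d', by simp [pvAStep, hd]⟩
    · rename_i h1
      split at h
      · rename_i h2
        subst h2
        rw [Option.map_eq_none_iff] at h
        obtain ⟨d', hd⟩ := ih _ h cols (cur ++ [')'])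
        exact ⟨d', by simp [pvAStep, hd]⟩
      · rename_i h2
        split at h
        · simp at h
        · rename_i h3
          rw [Option.map_eq_none_iff] at h
          obtain ⟨d', hd⟩ := ih _ h cols (cur ++ [c])
          exact ⟨d', by simp [pvAStep, h1, h2, h3, hd]⟩

-- A's fold up to the first top-level comma: close `current` as a column, restart at depth 0
lemma pvFold_some : ∀ (cs : List Char) (d : Int) (i : Nat), pvNextTopComma cs d = some i →
    ∀ (cols : List (List Char)) (cur : List Char),
    cs.foldl pvAStep (cols, cur, d) =
      (cs.drop (i + 1)).foldl pvAStep (cols ++ [cur ++ cs.take i], [], 0) := by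
  intro cs
  induction cs with
  | nil => intro d i h; simp [pvNextTopComma] at h
  | cons c rest ih =>
    intro d i h cols cur
    rw [pvNextTopComma] at h
    split at h
    · rename_i h1
      subst h1
      rw [Option.map_eq_some_iff] at h
      obtain ⟨j, hj, rfl⟩ := h
      rw [List.foldl_cons]
      have step : pvAStep (cols, cur, d) '(' = (cols, cur ++ ['('], d + 1) := by
        simp [pvAStep]
      rw [step, ih _ _ hj]
      simp
    · rename_i h1
      split at h
      · rename_i h2
        subst h2
        rw [Option.map_eq_some_iff] at h
        obtain ⟨j, hj, rfl⟩ := h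
        rw [List.foldl_cons]
        have step : pvAStep (cols, cur, d) ')' = (cols, cur ++ [')'], d - 1) := by
          simp [pvAStep]
        rw [step, ih _ _ hj]
        simp
      · rename_i h2
        split at h
        · rename_i h3
          obtain ⟨rfl, rfl⟩ := h3
          have : i = 0 := (Option.some.inj h).symm
          subst this
          rw [List.foldl_cons]
          have step : pvAStep (cols, cur, 0) ',' = (cols ++ [cur], [], 0) := by
            simp [pvAStep]
          rw [step]
          simp
        · rename_i h3
          rw [Option.map_eq_some_iff] at h
          obtain ⟨j, hj, rfl⟩ := h
          rw [List.foldl_cons]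
          have step : pvAStep (cols, cur, d) c = (cols, cur ++ [c], d) := by
            simp [pvAStep, h1, h2, h3]
          rw [step, ih _ _ hj]
          simp

lemma pvMain : ∀ (n : Nat) (cs : List Char), cs.length ≤ n →
    ∀ (cols : List (List Char)) (cur : List Char),
    pvFinishA (cs.foldl pvAStep (cols, cur, 0)) = cols ++ pvTrimLast (pvSplitFrom cur cs) := by
  intro n
  induction n with
  | zero =>
    intro cs hlen cols cur
    have : cs = [] := List.length_eq_zero_iff.mp (Nat.le_zero.mp hlen)
    subst this
    rw [pvSplitFrom_none _ _ (by simp [pvNextTopComma])]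
    simp only [List.foldl_nil, List.append_nil, pvFinishA, pvTrimLast]
    split <;> simp_all
  | succ n ih =>
    intro cs hlen cols cur
    cases h : pvNextTopComma cs 0 with
    | none =>
      rw [pvSplitFrom_none _ _ h]
      obtain ⟨d', hd⟩ := pvFold_none cs 0 h cols cur
      rw [hd]
      simp only [pvFinishA, pvTrimLast]
      split <;> simp_all
    | some i =>
      rw [pvSplitFrom_some _ _ _ h, pvFold_some cs 0 i h cols cur]
      have hne : cs ≠ [] := by intro e; subst e; simp [pvNextTopComma] at h
      have hpos : 0 < cs.length := List.length_pos_iff.mpr hne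
      have hlt : (cs.drop (i + 1)).length ≤ n := by
        simp [List.length_drop]; omega
      rw [ih _ hlt (cols ++ [cur ++ cs.take i]) []]
      rw [pvTrimLast_cons _ _ (pvSplitFrom_ne_nil [] _)]
      simp

-- ===== VERDICT (by name: the statement is the Claim_ definition above) =====
theorem split_select_columns_py_spec : Claim_equal_split_select_columns_py := by
  intro s _
  show split_select_columns_py s = split_select_columns_py_alt s
  unfold split_select_columns_py split_select_columns_py_alt
  rw [pvMain s.toList.length s.toList le_rfl [] []]
  rw [pvSplitFrom_nil_eq]
  simp
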